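-- pv_equiv track=rewrite | github.com/lidorelias3/Lidor_Elias_Answers | python/Word Swap/WordSwap.py | replace_every_second_word
-- ===== SOURCE A (Python) =====
-- def replace_every_second_word(sentence, word_to_replace="biss10"):
--     """
--     Function will return a new string. In the new string each even word will replace to a new word
--     :param sentence: the sentence
--     :param word_to_replace: optional - the new word. default - 'biss10'
--     :return: a new sentense
--     """
--     new_sentence = []
--     even = False
--     for word in sentence.split(' '):
--         if even:
--             new_sentence.append(word_to_replace)
--             even = False
--         else:
--             new_sentence.append(word)
--             even = True
--
--     return ' '.join(new_sentence)
-- ===== SOURCE B (Python) =====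
-- def replace_every_second_word(sentence, word_to_replace="biss10"):
--     """Recursive pair-wise rebuild: keep the first word of each pair, swap in
--     the replacement for the second, recurse on the rest; no parity flag."""
--     def go(words):
--         if len(words) <= 1:
--             return words
--         return [words[0], word_to_replace] + go(words[2:])
--     return ' '.join(go(sentence.split(' ')))
-- ===== Notes on version B (the rewrite author's own statement) =====
-- stated objective: alternative
-- what changed: Replaced the single-pass boolean-toggle accumulator loop with a recursive function that consumes the word list two words at a time, emitting the first word of each pair and the replacement for the second; no parity state or per-word branch remains.
import Mathlib
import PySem

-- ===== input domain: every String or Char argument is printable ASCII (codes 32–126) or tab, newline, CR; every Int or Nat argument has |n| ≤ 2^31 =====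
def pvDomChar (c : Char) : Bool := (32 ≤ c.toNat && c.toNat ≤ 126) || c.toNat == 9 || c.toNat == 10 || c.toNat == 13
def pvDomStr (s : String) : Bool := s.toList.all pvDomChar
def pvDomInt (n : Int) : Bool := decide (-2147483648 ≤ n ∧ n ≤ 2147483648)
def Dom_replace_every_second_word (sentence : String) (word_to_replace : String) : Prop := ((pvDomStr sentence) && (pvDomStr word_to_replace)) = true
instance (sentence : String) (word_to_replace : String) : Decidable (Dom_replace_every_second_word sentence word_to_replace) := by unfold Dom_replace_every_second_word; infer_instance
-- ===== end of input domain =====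

-- B replaces A's boolean-toggle accumulator loop by a recursive pair-wise rebuild:
-- consume two words at a time, keep the first, substitute the second (alternative).

-- s.split(" "): the separator is the non-empty literal " ", so split? is always some
def pvSplitSpace (s : String) : List String := (PySem.Str.split? s " ").getD []

-- ===== PORT A =====
def replace_every_second_word (sentence : String) (word_to_replace : String) : String :=
  let st := (pvSplitSpace sentence).foldl
    (fun (st : List String × Bool) word =>
      if st.2 then (st.1 ++ [word_to_replace], false)
      else (st.1 ++ [word], true)) ([], false)
  PySem.Str.join " " st.1

-- ===== PORT B =====
-- Source B's inner 'go': lists of length ≤ 1 are returned as-is; otherwise emit the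
-- first word and the replacement, recurse on the rest (words[2:]).
def pvGo (w : String) : List String → List String
  | [] => []
  | [x] => [x]
  | x :: _ :: rest => x :: w :: pvGo w rest

def replace_every_second_word_alt (sentence : String) (word_to_replace : String) : String :=
  PySem.Str.join " " (pvGo word_to_replace (pvSplitSpace sentence))

-- ===== PRECONDITION & SPEC =====
def Spec_replace_every_second_word (sentence : String) (word_to_replace : String) (out : String) : Prop := out = replace_every_second_word_alt sentence word_to_replace
instance (sentence : String) (word_to_replace : String) (out : String) : Decidable (Spec_replace_every_second_word sentence word_to_replace out) := by unfold Spec_replace_every_second_word; infer_instance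

-- ===== CLAIM (what is proved, stated in full; the proofs are below) =====
def Claim_equal_replace_every_second_word : Prop := ∀ (sentence : String) (word_to_replace : String), Dom_replace_every_second_word sentence word_to_replace → Spec_replace_every_second_word sentence word_to_replace (replace_every_second_word sentence word_to_replace)

-- ===== LEMMAS AND PROOFS =====

-- A's toggle loop, started on 'even = False' with accumulator acc, appends exactly
-- the pair-wise rebuild of the remaining words.
lemma foldl_eq_pvGo (w : String) :
    ∀ (ws : List String) (acc : List String),
    (ws.foldl (fun (st : List String × Bool) word =>
        if st.2 then (st.1 ++ [w], false) else (st.1 ++ [word], true))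
      (acc, false)).1 = acc ++ pvGo w ws := by
  intro ws
  induction ws using pvGo.induct with
  | case1 => intro acc; simp [pvGo]
  | case2 x => intro acc; simp [pvGo]
  | case3 x y rest ih =>
    intro acc
    simp only [List.foldl_cons, if_false, if_true, Bool.false_eq_true, pvGo]
    rw [ih]
    simp

-- ===== VERDICT (by name: the statement is the Claim_ definition above) =====
theorem replace_every_second_word_spec : Claim_equal_replace_every_second_word := by
  intro sentence word_to_replace _
  unfold Spec_replace_every_second_word replace_every_second_word replace_every_second_word_alt
  simp only []
  rw [foldl_eq_pvGo word_to_replace (pvSplitSpace sentence) []]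
  simp
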